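-- pv_equiv track=rewrite | github.com/ariuk44/retake_exam_prep | day_1.py | isOddHeavy1
-- ===== SOURCE A (Python) =====
-- def isOddHeavy1(arr):
--     even_vals = [i for i in arr if i % 2 == 0]
--     odd_vals = [i for i in arr if i % 2 != 0]
--     if not odd_vals:
--         return 0
--     if not even_vals:
--         return 1
--     return 1 if even_vals and max(even_vals) < min(odd_vals) else 0
-- ===== SOURCE B (Python) =====
-- def isOddHeavy1(arr):
--     max_even = None
--     min_odd = None
--     for x in arr:
--         if x % 2 == 0:
--             if max_even is None or max_even < x:
--                 max_even = x
--         else: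
--             if min_odd is None or x < min_odd:
--                 min_odd = x
--     if min_odd is None:
--         return 0
--     if max_even is None:
--         return 1
--     return 1 if max_even < min_odd else 0
-- ===== Notes on version B (the rewrite author's own statement) =====
-- stated objective: faster
-- what changed: Replaced the two filtering list comprehensions plus max()/min() calls with a single pass over arr that maintains lazily-initialized running extrema (max_even, min_odd); constant-factor speedup from one traversal and no intermediate lists.
import Mathlib
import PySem

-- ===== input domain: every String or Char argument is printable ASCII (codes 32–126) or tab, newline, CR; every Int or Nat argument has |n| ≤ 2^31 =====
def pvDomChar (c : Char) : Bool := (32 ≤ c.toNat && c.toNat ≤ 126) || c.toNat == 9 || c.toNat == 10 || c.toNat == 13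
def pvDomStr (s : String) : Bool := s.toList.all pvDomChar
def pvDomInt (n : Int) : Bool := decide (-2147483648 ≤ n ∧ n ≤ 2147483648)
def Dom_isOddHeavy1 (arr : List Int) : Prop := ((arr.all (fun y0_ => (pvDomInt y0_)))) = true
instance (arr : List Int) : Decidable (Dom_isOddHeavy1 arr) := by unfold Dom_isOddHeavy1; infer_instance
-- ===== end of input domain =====

-- B is a single pass tracking running extrema instead of two list comprehensions plus max()/min(); alternative decomposition, same O(n) cost.

-- ===== PORT A =====
def isOddHeavy1 (arr : List Int) : Int :=
  let even_vals := arr.filter (fun i => PySem.Int.mod i 2 == 0)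
  let odd_vals := arr.filter (fun i => !(PySem.Int.mod i 2 == 0))
  if odd_vals.isEmpty then 0
  else if even_vals.isEmpty then 1
  else
    -- 'even_vals and max(even_vals) < min(odd_vals)': both lists nonempty here, so max?/min? are some
    match PySem.List.max? even_vals (fun x => x), PySem.List.min? odd_vals (fun x => x) with
    | some mx, some mn => if mx < mn then 1 else 0
    | _, _ => 0

-- ===== PORT B =====
def oddHeavyLoop : List Int → Option Int → Option Int → Int
  | [], maxEven, minOdd =>
      match minOdd with
      | none => 0
      | some mn =>
        match maxEven with
        | none => 1
        | some mx => if mx < mn then 1 else 0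
  | x :: xs, maxEven, minOdd =>
      if PySem.Int.mod x 2 == 0 then
        oddHeavyLoop xs
          (match maxEven with
           | none => some x
           | some m => if m < x then some x else some m) minOdd
      else
        oddHeavyLoop xs maxEven
          (match minOdd with
           | none => some x
           | some m => if x < m then some x else some m)

def isOddHeavy1_alt (arr : List Int) : Int := oddHeavyLoop arr none none

-- ===== PRECONDITION & SPEC =====
def Spec_isOddHeavy1 (arr : List Int) (out : Int) : Prop := out = isOddHeavy1_alt arr
instance (arr : List Int) (out : Int) : Decidable (Spec_isOddHeavy1 arr out) := by unfold Spec_isOddHeavy1; infer_instance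

-- ===== CLAIM (what is proved, stated in full; the proofs are below) =====
def Claim_equal_isOddHeavy1 : Prop := ∀ (arr : List Int), Dom_isOddHeavy1 arr → Spec_isOddHeavy1 arr (isOddHeavy1 arr)

-- ===== LEMMAS AND PROOFS =====

-- the two state-update functions of B's loop
def stepMax (me : Option Int) (x : Int) : Option Int :=
  match me with
  | none => some x
  | some m => if m < x then some x else some m

def stepMin (mo : Option Int) (x : Int) : Option Int :=
  match mo with
  | none => some x
  | some m => if x < m then some x else some m

-- the decision B makes at the end of the loop
def finishOH (me mo : Option Int) : Int :=
  match mo with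
  | none => 0
  | some mn =>
    match me with
    | none => 1
    | some mx => if mx < mn then 1 else 0

theorem stepMax_some (a x : Int) : stepMax (some a) x = some (max a x) := by
  simp only [stepMax]; split_ifs with h <;> simp only [Option.some.injEq] <;> omega

theorem stepMin_some (a x : Int) : stepMin (some a) x = some (min a x) := by
  simp only [stepMin]; split_ifs with h <;> simp only [Option.some.injEq] <;> omega

-- B's interleaved loop = independent folds over the even and odd sublists
theorem loop_eq_finish (xs : List Int) (me mo : Option Int) :
    oddHeavyLoop xs me mo =
      finishOH ((xs.filter (fun i => PySem.Int.mod i 2 == 0)).foldl stepMax me)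
               ((xs.filter (fun i => !(PySem.Int.mod i 2 == 0))).foldl stepMin mo) := by
  induction xs generalizing me mo with
  | nil => rfl
  | cons x t ih =>
      by_cases h : (PySem.Int.mod x 2 == 0) = true <;>
        simp only [oddHeavyLoop, List.filter_cons, h, Bool.not_true, Bool.not_false,
          if_true, if_false, Bool.false_eq_true, List.foldl_cons, ih, stepMax, stepMin]

theorem foldl_stepMax_some (t : List Int) (a : Int) :
    t.foldl stepMax (some a) = some (t.foldl max a) := by
  induction t generalizing a with
  | nil => rfl
  | cons y t ih => simp [List.foldl_cons, stepMax_some, ih]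

theorem foldl_stepMin_some (t : List Int) (a : Int) :
    t.foldl stepMin (some a) = some (t.foldl min a) := by
  induction t generalizing a with
  | nil => rfl
  | cons y t ih => simp [List.foldl_cons, stepMin_some, ih]

-- the running max from 'none' is exactly Python's max() of the list
theorem foldl_stepMax_eq_max? (l : List Int) :
    l.foldl stepMax none = PySem.List.max? l (fun x => x) := by
  cases l with
  | nil => rfl
  | cons x t =>
      rw [PySem.List.max?_id_cons]
      simpa [List.foldl_cons, stepMax] using foldl_stepMax_some t x

theorem foldl_stepMin_eq_min? (l : List Int) :
    l.foldl stepMin none = PySem.List.min? l (fun x => x) := by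
  cases l with
  | nil => rfl
  | cons x t =>
      rw [PySem.List.min?_id_cons]
      simpa [List.foldl_cons, stepMin] using foldl_stepMin_some t x

-- ===== VERDICT (by name: the statement is the Claim_ definition above) =====
theorem isOddHeavy1_spec : Claim_equal_isOddHeavy1 := by
  intro arr _
  unfold Spec_isOddHeavy1 isOddHeavy1 isOddHeavy1_alt
  rw [loop_eq_finish, foldl_stepMax_eq_max?, foldl_stepMin_eq_min?]
  generalize arr.filter (fun i => PySem.Int.mod i 2 == 0) = evens
  generalize arr.filter (fun i => !(PySem.Int.mod i 2 == 0)) = odds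
  rcases odds with _ | ⟨o, os⟩
  · simp [finishOH, show PySem.List.min? ([] : List Int) (fun x => x) = none from
      (PySem.List.min?_eq_none_iff _ _).mpr rfl]
  · rcases evens with _ | ⟨e, es⟩
    · simp [finishOH, PySem.List.min?_id_cons,
        show PySem.List.max? ([] : List Int) (fun x => x) = none from
          (PySem.List.max?_eq_none_iff _ _).mpr rfl]
    · simp [finishOH, PySem.List.min?_id_cons, PySem.List.max?_id_cons]
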